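-- pv_equiv track=rewrite | github.com/gsandoo/problem-solving | python/programmers/LV.2/수식 최대화.py | solution
-- ===== SOURCE A (Python) =====
-- from itertools import permutations
--
-- def solution(expression):
--     answer = 0
--
--     # 1. 연산자 순열 만들기
--     oper = set()
--     for op in expression :
--         if op in '*-+' :
--             oper.add(op)
--
--     # 2. 연산자 순열 리스트 생성
--     li_oper = list(permutations(oper))
--
--     # 3. 숫자랑 연산자랑 분리
--     def parse(expr) :
--         result = []
--         num = ''
--         for ch in expr :
--             if ch in '*-+':
--                 result.append(int(num)) # 숫자 넣고
--                 result.append(ch) # 그 다음 부호 넣고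
--                 num = ''
--             else:
--                 num += ch
--         result.append(int(num))
--         return result
--
--     parse_expr = parse(expression)
--
--     # 4. 우선 순위에 따라 계산하기
--     def calc(expr_list, prior):
--         expr= expr_list[:] # 복사, 원본 변경 방지
--         for op in prior: #('*','+','-') ..
--             stack = []
--             i = 0
--             while i < len(expr):
--                 if expr[i] == op:
--                     prev = stack.pop()
--                     nxt = expr[i+1]
--                     if op == '+':
--                         stack.append(prev + nxt)
--                     elif op == '-':
--                         stack.append(prev - nxt)
--                     elif op == '*':
--                         stack.append(prev * nxt)
--                     i += 2 # 연산자, 피연산자 2개 스킵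
--                 else:
--                     stack.append(expr[i])
--                     i +=1
--             expr = stack # 최신 데이터가 반영된 값으로 업데이트
--         return abs(expr[0])
--
--     # 5. 모든 우선순위 조합에 대해 계산하여 최댓값 찾기
--     for op in li_oper :
--         answer = max(answer, calc(parse_expr, op))
--     return answer
-- ===== SOURCE B (Python) =====
-- from itertools import permutations
--
-- def solution(expression):
--     # tokenize into parallel lists: nums (n+1 numbers) and ops (n operators)
--     nums = []
--     ops = []
--     cur = ''
--     for ch in expression:
--         if ch in '*-+':
--             nums.append(int(cur))
--             ops.append(ch)
--             cur = ''
--         else: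
--             cur += ch
--     nums.append(int(cur))
--
--     # distinct operators, first-occurrence order
--     uniq = list(dict.fromkeys(ops))
--
--     def ev(ns, os, prior):
--         # value of the sub-expression (ns, os) when the operators are applied
--         # in priority order prior[0] (highest) .. prior[-1] (lowest)
--         if not prior:
--             return ns[0]
--         op = prior[-1]
--         i = None
--         for j in range(len(os)):
--             if os[j] == op:
--                 i = j  # rightmost occurrence wins (left-associativity)
--         if i is None:
--             return ev(ns, os, prior[:-1])
--         left = ev(ns[:i + 1], os[:i], prior)
--         right = ev(ns[i + 1:], os[i + 1:], prior[:-1])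
--         if op == '+':
--             return left + right
--         if op == '-':
--             return left - right
--         return left * right
--
--     return max(abs(ev(nums, ops, list(p))) for p in permutations(uniq))
-- ===== Notes on version B (the rewrite author's own statement) =====
-- stated objective: alternative
-- what changed: Replaces the per-operator stack sweeps over a mixed token list by a recursive divide-and-conquer evaluator on parallel number/operator lists that splits at the rightmost occurrence of the lowest-priority operator.
import Mathlib
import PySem

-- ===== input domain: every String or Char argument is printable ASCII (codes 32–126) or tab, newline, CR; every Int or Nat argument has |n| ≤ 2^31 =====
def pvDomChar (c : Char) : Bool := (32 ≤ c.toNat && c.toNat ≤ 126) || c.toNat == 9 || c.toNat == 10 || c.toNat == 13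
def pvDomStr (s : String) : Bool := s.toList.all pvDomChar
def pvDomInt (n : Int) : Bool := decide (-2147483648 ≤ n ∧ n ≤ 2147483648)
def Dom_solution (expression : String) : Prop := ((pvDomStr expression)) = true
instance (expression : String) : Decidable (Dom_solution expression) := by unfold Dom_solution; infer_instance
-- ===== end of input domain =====

-- B replaces A's per-operator stack sweeps over one mixed token list by a recursive
-- divide-and-conquer evaluator (split at the rightmost occurrence of the lowest-priority
-- operator) over parallel number/operator lists; objective: alternative algorithm, same cost class.

-- ===== PORT A =====

-- the three operator characters of the string '*-+' (membership test `ch in '*-+'`)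
def pvOps : List Char := ['*', '-', '+']

-- a Python heterogeneous list element: either an int or an operator character
inductive Tok
  | num (n : Int)
  | op (c : Char)
deriving DecidableEq, Repr

-- int(s); Pre_solution guarantees the parse succeeds (Python raises ValueError otherwise)
def pvInt (cs : List Char) : Int := (PySem.Int.ofChars? cs).getD 0

-- the int held by a token; tokens combined by calc are always nums under Pre_solution
def pvTokNum (t : Tok) : Int :=
  match t with
  | .num n => n
  | .op _ => 0

-- A's parse: scan chars, accumulate digits of the current number, emit (num, op) on operators
def pvA_parse (cs : List Char) (result : List Tok) (num : List Char) : List Tok :=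
  match cs with
  | [] => result ++ [Tok.num (pvInt num)]
  | c :: rest =>
      if c ∈ pvOps then pvA_parse rest (result ++ [Tok.num (pvInt num), Tok.op c]) []
      else pvA_parse rest result (num ++ [c])

-- A's inner while-loop over one operator `c`: stack kept head-first (Python list end = head)
def pvA_sweep (c : Char) (stack : List Tok) (expr : List Tok) : List Tok :=
  match expr with
  | [] => stack.reverse
  | t :: rest =>
      if t = Tok.op c then
        let prev := stack.headD (Tok.num 0)   -- stack.pop(); nonempty under Pre_solution
        let nxt := rest.headD (Tok.num 0)     -- expr[i+1]; present under Pre_solution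
        let st0 := stack.tail
        let st1 :=
          if c = '+' then Tok.num (pvTokNum prev + pvTokNum nxt) :: st0
          else if c = '-' then Tok.num (pvTokNum prev - pvTokNum nxt) :: st0
          else if c = '*' then Tok.num (pvTokNum prev * pvTokNum nxt) :: st0
          else st0
        pvA_sweep c st1 rest.tail             -- i += 2
      else pvA_sweep c (t :: stack) rest      -- i += 1
  termination_by expr.length
  decreasing_by
  · simp [List.length_tail]
  · simp

-- A's calc: sweep once per operator of the priority tuple, then abs of the single leftover
def pvA_calc (exprList : List Tok) (prior : List Char) : Int :=
  let expr := prior.foldl (fun e o => pvA_sweep o [] e) exprList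
  |pvTokNum (expr.headD (Tok.num 0))|        -- abs(expr[0]); nonempty under Pre_solution

def solution (expression : String) : Int :=
  let oper : PySem.Set Char :=
    expression.toList.foldl (fun s ch => if ch ∈ pvOps then PySem.Set.add s ch else s) PySem.Set.empty
  let liOper := PySem.List.permutations oper oper.length   -- list(permutations(oper))
  let parseExpr := pvA_parse expression.toList [] []
  liOper.foldl (fun answer p => max answer (pvA_calc parseExpr p)) 0

-- ===== PORT B =====

-- B's tokenizer: parallel lists nums (n+1 numbers) / ops (n operator chars)
def pvB_tok (cs : List Char) (nums : List Int) (ops : List Char) (cur : List Char) :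
    List Int × List Char :=
  match cs with
  | [] => (nums ++ [pvInt cur], ops)
  | c :: rest =>
      if c ∈ pvOps then pvB_tok rest (nums ++ [pvInt cur]) (ops ++ [c]) []
      else pvB_tok rest nums ops (cur ++ [c])

-- Source B's forward scan `for j, c in enumerate(os): if c == op: i = j` (last match wins)
def pvB_rfind (os : List Char) (c : Char) : Option Nat :=
  (PySem.List.enumerate os).foldl (fun acc p => if p.2 = c then some p.1.toNat else acc) none

-- needed by pvB_eval's termination proof (cited in decreasing_by)
theorem pvB_rfind_append (os : List Char) (x c : Char) :
    pvB_rfind (os ++ [x]) c = if x = c then some os.length else pvB_rfind os c := by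
  unfold pvB_rfind
  rw [PySem.List.enumerate_append, List.foldl_append]
  simp [PySem.List.enumerate]

theorem pvB_rfind_lt (os : List Char) (c : Char) (i : Nat) :
    pvB_rfind os c = some i → i < os.length := by
  induction os using List.reverseRecOn with
  | nil => intro h; simp [pvB_rfind, PySem.List.enumerate] at h
  | append_singleton os x ih =>
      rw [pvB_rfind_append]
      split_ifs with hx
      · intro h; simp at h; simp [← h]
      · intro h; have := ih h; simp; omega

-- B's recursive evaluator: lowest-priority operator = prior[-1]; split at its rightmost
-- occurrence; the left part keeps the full priority list, the right part has no such operator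
def pvB_eval (ns : List Int) (os : List Char) (prior : List Char) : Int :=
  if hp : prior.isEmpty then ns.headD 0        -- ns[0]; nonempty under Pre_solution
  else
    let op := prior.getLastD ' '               -- prior[-1]
    match h : pvB_rfind os op with
    | none => pvB_eval ns os prior.dropLast
    | some i =>
        let left := pvB_eval (ns.take (i + 1)) (os.take i) prior
        let right := pvB_eval (ns.drop (i + 1)) (os.drop (i + 1)) prior.dropLast
        if op = '+' then left + right
        else if op = '-' then left - right
        else left * right
  termination_by os.length + prior.length
  decreasing_by
  · have : prior ≠ [] := by simpa [List.isEmpty_iff] using hp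
    have : 0 < prior.length := List.length_pos_iff.mpr this
    simp [List.length_dropLast]; omega
  · have := pvB_rfind_lt os _ i h
    simp; omega
  · have : prior ≠ [] := by simpa [List.isEmpty_iff] using hp
    have h1 : 0 < prior.length := List.length_pos_iff.mpr this
    have := pvB_rfind_lt os _ i h
    simp [List.length_dropLast]; omega

def solution_alt (expression : String) : Int :=
  let t := pvB_tok expression.toList [] [] []
  let uniq := PySem.List.dedup t.2                          -- list(dict.fromkeys(ops))
  let vals := (PySem.List.permutations uniq uniq.length).map (fun p => |pvB_eval t.1 t.2 p|)
  (PySem.List.max? vals (fun v => v)).getD 0                -- max(...); never empty in Python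

-- ===== PRECONDITION & SPEC =====

-- plain split of the character list at the operator characters:
-- first chunk, then (operator, following chunk) pairs
def pvSplit (cs : List Char) : List Char × List (Char × List Char) :=
  match cs with
  | [] => ([], [])
  | c :: rest =>
      let (f, r) := pvSplit rest
      if c ∈ pvOps then ([], (c, f) :: r) else (c :: f, r)

-- Pre_: every maximal operator-free chunk of the string is a valid Python int literal;
-- exactly on these inputs A's int(...) calls (and hence A) return instead of raising ValueError
def Pre_solution (expression : String) : Prop :=
  (PySem.Int.ofChars? (pvSplit expression.toList).1).isSome = true ∧
  ∀ p ∈ (pvSplit expression.toList).2, (PySem.Int.ofChars? p.2).isSome = true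

instance (expression : String) : Decidable (Pre_solution expression) := by
  unfold Pre_solution; infer_instance

def pvWitness_solution : String := "100-200*300-500+20"

def Spec_solution (expression : String) (out : Int) : Prop := out = solution_alt expression
instance (expression : String) (out : Int) : Decidable (Spec_solution expression out) := by
  unfold Spec_solution; infer_instance

-- ===== CLAIM (what is proved, stated in full; the proofs are below) =====
def Claim_equal_solution : Prop := ∀ (expression : String), Dom_solution expression → Pre_solution expression → Spec_solution expression (solution expression)

-- ===== LEMMAS AND PROOFS =====

-- the common if-chain '+' / '-' / else '*' applied by both evaluators
def pvApply (a : Int) (c : Char) (b : Int) : Int :=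
  if c = '+' then a + b else if c = '-' then a - b else a * b

-- pair representation of an alternating token list: head number + (operator, number) pairs
def pvFlat (l : List (Char × Int)) : List Tok :=
  l.flatMap (fun p => [Tok.op p.1, Tok.num p.2])

def pvToks (a : Int) (l : List (Char × Int)) : List Tok := Tok.num a :: pvFlat l

-- specification of one stack sweep on the pair representation
def pvSweepP (c : Char) (a : Int) (l : List (Char × Int)) : Int × List (Char × Int) :=
  match l with
  | [] => (a, [])
  | (d, x) :: r =>
      if d = c then pvSweepP c (pvApply a c x) r
      else
        let (b, m) := pvSweepP c x r
        (a, (d, b) :: m)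

-- A's push step for a valid operator equals pvApply
theorem pvA_step (c : Char) (hc : c ∈ pvOps) (p n : Int) (st0 : List Tok) :
    (if c = '+' then Tok.num (p + n) :: st0
     else if c = '-' then Tok.num (p - n) :: st0
     else if c = '*' then Tok.num (p * n) :: st0
     else st0) = Tok.num (pvApply p c n) :: st0 := by
  rcases (show c = '*' ∨ c = '-' ∨ c = '+' from by simpa [pvOps] using hc) with rfl | rfl | rfl <;>
    simp [pvApply]

theorem pvA_sweep_flat (c : Char) (hc : c ∈ pvOps) :
    ∀ (l : List (Char × Int)) (a : Int) (st : List Tok),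
      pvA_sweep c (Tok.num a :: st) (pvFlat l) =
        st.reverse ++ pvToks (pvSweepP c a l).1 (pvSweepP c a l).2 := by
  intro l
  induction l with
  | nil => intro a st; simp [pvFlat, pvA_sweep, pvSweepP, pvToks]
  | cons q r ih =>
      intro a st
      obtain ⟨d, x⟩ := q
      rw [show pvFlat ((d, x) :: r) = Tok.op d :: Tok.num x :: pvFlat r from rfl]
      by_cases hd : d = c
      · subst hd
        rw [pvA_sweep]
        simp only [List.headD_cons, List.tail_cons, pvTokNum]
        rw [pvA_step _ hc]
        rw [ih]
        simp [pvSweepP]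
      · have hne : Tok.op d ≠ Tok.op c := by simp [hd]
        rw [pvA_sweep]
        simp only [if_neg hne, List.headD_cons, List.tail_cons]
        rw [pvA_sweep]
        simp only [if_neg (by simp : (Tok.num x : Tok) ≠ Tok.op c), List.headD_cons, List.tail_cons]
        rw [ih]
        simp only [pvSweepP, if_neg hd]
        simp [pvToks, pvFlat]

theorem pvA_sweep_toks (c : Char) (hc : c ∈ pvOps) (a : Int) (l : List (Char × Int)) :
    pvA_sweep c [] (pvToks a l) = pvToks (pvSweepP c a l).1 (pvSweepP c a l).2 := by
  rw [show pvToks a l = Tok.num a :: pvFlat l from rfl]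
  rw [pvA_sweep]
  simp only [if_neg (by simp : (Tok.num a : Tok) ≠ Tok.op c)]
  simpa using pvA_sweep_flat c hc l a []

-- iterated sweeps on tokens = iterated pvSweepP on the pair representation
theorem pvA_foldl_sweeps (prior : List Char) (hop : ∀ c ∈ prior, c ∈ pvOps) :
    ∀ (a : Int) (l : List (Char × Int)),
      prior.foldl (fun e o => pvA_sweep o [] e) (pvToks a l) =
        pvToks (prior.foldl (fun q o => pvSweepP o q.1 q.2) (a, l)).1
               (prior.foldl (fun q o => pvSweepP o q.1 q.2) (a, l)).2 := by
  induction prior with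
  | nil => intro a l; simp
  | cons c ps ih =>
      intro a l
      simp only [List.foldl_cons]
      rw [pvA_sweep_toks c (hop c (by simp)) a l]
      exact ih (fun d hd => hop d (by simp [hd])) _ _

-- operators surviving a sweep: not the swept one, and all present before
theorem pvSweepP_snd_mem (c : Char) :
    ∀ (l : List (Char × Int)) (a : Int) (p : Char × Int),
      p ∈ (pvSweepP c a l).2 → p.1 ≠ c ∧ p.1 ∈ l.map Prod.fst := by
  intro l
  induction l with
  | nil => intro a p hp; simp [pvSweepP] at hp
  | cons q r ih =>
      intro a p hp
      obtain ⟨d, x⟩ := q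
      by_cases hd : d = c
      · subst hd
        simp only [pvSweepP] at hp
        have := ih (pvApply a d x) p hp
        exact ⟨this.1, by simp [this.2]⟩
      · simp only [pvSweepP, if_neg hd] at hp
        rcases List.mem_cons.mp hp with h | h
        · subst h; exact ⟨hd, by simp⟩
        · have := ih x p h
          exact ⟨this.1, by simp [this.2]⟩

theorem pvFold_snd_mem (ps : List Char) :
    ∀ (a : Int) (l : List (Char × Int)) (p : Char × Int),
      p ∈ (ps.foldl (fun q o => pvSweepP o q.1 q.2) (a, l)).2 →
        p.1 ∉ ps ∧ p.1 ∈ l.map Prod.fst := by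
  induction ps with
  | nil =>
      intro a l p hp
      simp only [List.foldl_nil] at hp
      exact ⟨by simp, List.mem_map.mpr ⟨p, hp, rfl⟩⟩
  | cons c ps ih =>
      intro a l p hp
      simp only [List.foldl_cons] at hp
      have h1 := ih (pvSweepP c a l).1 (pvSweepP c a l).2 p hp
      obtain ⟨hnp, hmem⟩ := h1
      rcases List.mem_map.mp hmem with ⟨q, hq, hq1⟩
      have h2 := pvSweepP_snd_mem c l a q hq
      refine ⟨?_, by rw [← hq1]; exact h2.2⟩
      simp only [List.mem_cons, not_or]
      exact ⟨by rw [← hq1]; exact h2.1, hnp⟩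

-- a sweep over pairs all carrying the swept operator is a plain left fold
theorem pvSweepP_all (c : Char) :
    ∀ (m : List (Char × Int)) (a : Int), (∀ p ∈ m, p.1 = c) →
      pvSweepP c a m = (m.foldl (fun acc p => pvApply acc c p.2) a, []) := by
  intro m
  induction m with
  | nil => intro a _; simp [pvSweepP]
  | cons q r ih =>
      intro a hall
      obtain ⟨d, x⟩ := q
      have hd : d = c := hall (d, x) (by simp)
      subst hd
      simp only [pvSweepP, List.foldl_cons]
      exact ih (pvApply a d x) (fun p hp => hall p (by simp [hp]))

-- a sweep with c ≠ o distributes over a split at an occurrence of o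
theorem pvSweepP_split (c o : Char) (hco : c ≠ o) :
    ∀ (L : List (Char × Int)) (a x : Int) (R : List (Char × Int)),
      pvSweepP c a (L ++ (o, x) :: R) =
        ((pvSweepP c a L).1,
         (pvSweepP c a L).2 ++ (o, (pvSweepP c x R).1) :: (pvSweepP c x R).2) := by
  intro L
  induction L with
  | nil =>
      intro a x R
      simp only [List.nil_append, pvSweepP, if_neg (Ne.symm hco)]
  | cons q L ih =>
      intro a x R
      obtain ⟨d, y⟩ := q
      by_cases hd : d = c
      · subst hd
        simp only [List.cons_append, pvSweepP]
        exact ih (pvApply a d y) x R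
      · simp only [List.cons_append, pvSweepP, if_neg hd]
        rw [ih y x R]

theorem pvFold_split (ps : List Char) (o : Char) (ho : o ∉ ps) :
    ∀ (L : List (Char × Int)) (a x : Int) (R : List (Char × Int)),
      ps.foldl (fun q c => pvSweepP c q.1 q.2) (a, L ++ (o, x) :: R) =
        ((ps.foldl (fun q c => pvSweepP c q.1 q.2) (a, L)).1,
         (ps.foldl (fun q c => pvSweepP c q.1 q.2) (a, L)).2 ++
           (o, (ps.foldl (fun q c => pvSweepP c q.1 q.2) (x, R)).1) ::
             (ps.foldl (fun q c => pvSweepP c q.1 q.2) (x, R)).2) := by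
  induction ps with
  | nil => intro L a x R; simp
  | cons c ps ih =>
      intro L a x R
      have hc : c ≠ o := fun h => ho (h ▸ List.mem_cons_self ..)
      simp only [List.foldl_cons]
      rw [pvSweepP_split c o hc L a x R]
      exact ih (fun h => ho (List.mem_cons_of_mem _ h)) (pvSweepP c a L).2 (pvSweepP c a L).1
        (pvSweepP c x R).1 (pvSweepP c x R).2

theorem pvB_rfind_none (os : List Char) (c : Char) :
    pvB_rfind os c = none → c ∉ os := by
  induction os using List.reverseRecOn with
  | nil => intro _ h; simp at h
  | append_singleton os x ih =>
      rw [pvB_rfind_append]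
      split_ifs with hx
      · intro h; simp at h
      · intro h hmem
        rcases List.mem_append.mp hmem with h1 | h1
        · exact ih h h1
        · simp at h1; exact hx (h1 ▸ rfl)

theorem pvB_rfind_spec (os : List Char) (c : Char) :
    ∀ i : Nat, pvB_rfind os c = some i →
      ∃ (hi : i < os.length), os[i] = c ∧ c ∉ os.drop (i + 1) := by
  induction os using List.reverseRecOn with
  | nil => intro i h; simp [pvB_rfind, PySem.List.enumerate] at h
  | append_singleton os x ih =>
      intro i h
      rw [pvB_rfind_append] at h
      split_ifs at h with hx
      · have hi : i = os.length := by simpa using (Option.some.injEq _ _).mp h.symm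
        subst hi
        refine ⟨by simp, ?_, ?_⟩
        · rw [List.getElem_append_right (le_refl _)]; simpa using hx
        · simp
      · obtain ⟨hi, hget, hdrop⟩ := ih i h
        refine ⟨by simp; omega, ?_, ?_⟩
        · rw [List.getElem_append_left hi]; exact hget
        · rw [List.drop_append]
          intro hmem
          rcases List.mem_append.mp hmem with h1 | h1
          · exact hdrop h1
          · have : i + 1 - os.length = 0 := by omega
            rw [this] at h1; simp at h1; exact hx (h1 ▸ rfl)

-- MAIN: iterated sweeps compute exactly B's recursive evaluator (and leave no operators)
theorem pvMain : ∀ (N : Nat) (prior : List Char) (a : Int) (l : List (Char × Int)),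
    l.length + prior.length ≤ N → prior.Nodup → (∀ p ∈ l, p.1 ∈ prior) →
    prior.foldl (fun q c => pvSweepP c q.1 q.2) (a, l) =
      (pvB_eval (a :: l.map Prod.snd) (l.map Prod.fst) prior, []) := by
  intro N
  induction N with
  | zero =>
      intro prior a l hle hnd hsub
      have hp : prior = [] := List.eq_nil_of_length_eq_zero (by omega)
      have hl : l = [] := List.eq_nil_of_length_eq_zero (by omega)
      subst hp; subst hl
      simp [pvB_eval]
  | succ N ih =>
      intro prior a l hle hnd hsub
      rcases eq_or_ne prior [] with hp | hp
      · subst hp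
        have hl : l = [] := by
          cases l with
          | nil => rfl
          | cons q r => exact absurd (hsub q (by simp)) (by simp)
        subst hl
        simp [pvB_eval]
      · obtain ⟨ps, o, rfl⟩ : ∃ ps o, prior = ps ++ [o] :=
          ⟨prior.dropLast, prior.getLast hp, (List.dropLast_append_getLast hp).symm⟩
        have hps : ps.Nodup ∧ o ∉ ps := by
          rw [List.nodup_append] at hnd
          refine ⟨hnd.1, fun hmem => ?_⟩
          exact hnd.2.2 o hmem o (by simp) rfl
        -- unfold B's evaluator one step
        rw [pvB_eval]
        have hne : ((ps ++ [o] : List Char).isEmpty) = false := by simp [hp]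
        rw [hne]
        simp only [Bool.false_eq_true, dite_false]
        rw [show ((ps ++ [o] : List Char).getLastD ' ') = o from by simp]
        rw [List.dropLast_concat]
        have hL1 : (ps ++ [o]).foldl (fun q c => pvSweepP c q.1 q.2) (a, l) =
            pvSweepP o (ps.foldl (fun q c => pvSweepP c q.1 q.2) (a, l)).1
                       (ps.foldl (fun q c => pvSweepP c q.1 q.2) (a, l)).2 := by
          simp [List.foldl_append]
        split
        next heq =>
          -- o does not occur: evaluate with the remaining priorities
          have hnotin : o ∉ l.map Prod.fst := pvB_rfind_none _ _ heq
          have hsub' : ∀ p ∈ l, p.1 ∈ ps := by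
            intro p hpl
            rcases List.mem_append.mp (hsub p hpl) with h | h
            · exact h
            · exfalso; exact hnotin (List.mem_map.mpr ⟨p, hpl, by simpa using h⟩)
          rw [hL1, ih ps a l (by simp at hle; omega) hps.1 hsub']
          simp [pvSweepP]
        next i heq =>
          obtain ⟨hi', hget, hdrop⟩ := pvB_rfind_spec (l.map Prod.fst) o i heq
          have hi : i < l.length := by simpa using hi'
          have hx1 : l[i].1 = o := by simpa using hget
          have hxx : (l[i]'hi) = (o, (l[i]'hi).2) := by
            rw [← hx1]
          have hlL : l = l.take i ++ (o, (l[i]'hi).2) :: l.drop (i + 1) := by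
            rw [← hxx, List.getElem_cons_drop, List.take_append_drop]
          have hsubL : ∀ p ∈ l.take i, p.1 ∈ ps ++ [o] :=
            fun p hpl => hsub p (List.mem_of_mem_take hpl)
          have hRo : o ∉ (l.drop (i + 1)).map Prod.fst := by
            rw [List.map_drop]; exact hdrop
          have hsubR : ∀ p ∈ l.drop (i + 1), p.1 ∈ ps := by
            intro p hpl
            rcases List.mem_append.mp (hsub p (List.mem_of_mem_drop hpl)) with h | h
            · exact h
            · exfalso; exact hRo (List.mem_map.mpr ⟨p, hpl, by simpa using h⟩)
          -- IH on the right part (shorter list, fewer priorities)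
          have hIHR := ih ps ((l[i]'hi).2) (l.drop (i + 1))
            (by simp at hle; simp [List.length_drop]; omega) hps.1 hsubR
          -- IH on the left part (shorter list, same priorities)
          have hIHL := ih (ps ++ [o]) a (l.take i)
            (by simp at hle; simp [List.length_take]; omega) hnd hsubL
          -- distribute the first |ps| sweeps over the split
          have hfold : ps.foldl (fun q c => pvSweepP c q.1 q.2) (a, l) =
              ((ps.foldl (fun q c => pvSweepP c q.1 q.2) (a, l.take i)).1,
               (ps.foldl (fun q c => pvSweepP c q.1 q.2) (a, l.take i)).2 ++
                 (o, pvB_eval ((l[i]'hi).2 :: (l.drop (i + 1)).map Prod.snd)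
                       ((l.drop (i + 1)).map Prod.fst) ps) :: []) := by
            conv_lhs => rw [hlL]
            rw [pvFold_split ps o hps.2 (l.take i) a ((l[i]'hi).2) (l.drop (i + 1))]
            rw [hIHR]
          -- the operators left in front of the split point are all o
          have hallo : ∀ p ∈ (ps.foldl (fun q c => pvSweepP c q.1 q.2) (a, l.take i)).2, p.1 = o := by
            intro p hpm
            have h1 := pvFold_snd_mem ps a (l.take i) p hpm
            rcases List.mem_map.mp h1.2 with ⟨q, hq, hq1⟩
            have hpq : p.1 = q.1 := hq1.symm
            rcases List.mem_append.mp (hsubL q hq) with h | h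
            · exact absurd (by rw [hpq]; exact h) h1.1
            · rw [hpq]; simpa using h
          -- the last sweep folds them up, ending in B's left and right values
          have hlast : pvSweepP o (ps.foldl (fun q c => pvSweepP c q.1 q.2) (a, l.take i)).1
              ((ps.foldl (fun q c => pvSweepP c q.1 q.2) (a, l.take i)).2 ++
                [(o, pvB_eval ((l[i]'hi).2 :: (l.drop (i + 1)).map Prod.snd)
                      ((l.drop (i + 1)).map Prod.fst) ps)]) =
              (pvApply (pvB_eval (a :: (l.take i).map Prod.snd) ((l.take i).map Prod.fst) (ps ++ [o])) o
                 (pvB_eval ((l[i]'hi).2 :: (l.drop (i + 1)).map Prod.snd)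
                    ((l.drop (i + 1)).map Prod.fst) ps), []) := by
            rw [pvSweepP_all o _ _ (by
              intro p hpm
              rcases List.mem_append.mp hpm with h | h
              · exact hallo p h
              · rw [List.mem_singleton.mp h])]
            rw [List.foldl_append]
            have hS1 : (ps.foldl (fun q c => pvSweepP c q.1 q.2) (a, l.take i)).2.foldl
                (fun acc p => pvApply acc o p.2)
                (ps.foldl (fun q c => pvSweepP c q.1 q.2) (a, l.take i)).1 =
                pvB_eval (a :: (l.take i).map Prod.snd) ((l.take i).map Prod.fst) (ps ++ [o]) := by
              have h2 := pvSweepP_all o (ps.foldl (fun q c => pvSweepP c q.1 q.2) (a, l.take i)).2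
                (ps.foldl (fun q c => pvSweepP c q.1 q.2) (a, l.take i)).1 hallo
              have h3 : (ps ++ [o]).foldl (fun q c => pvSweepP c q.1 q.2) (a, l.take i) =
                  pvSweepP o (ps.foldl (fun q c => pvSweepP c q.1 q.2) (a, l.take i)).1
                             (ps.foldl (fun q c => pvSweepP c q.1 q.2) (a, l.take i)).2 := by
                simp [List.foldl_append]
              have h4 := hIHL
              rw [h3, h2] at h4
              exact (Prod.mk.injEq _ _ _ _).mp h4 |>.1
            rw [hS1]
            simp
          rw [hL1, hfold, hlast]
          -- finally, B's slices are exactly the split parts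
          have hns1 : (a :: l.map Prod.snd).take (i + 1) = a :: (l.take i).map Prod.snd := by
            rw [List.take_succ_cons, List.map_take]
          have hos1 : (l.map Prod.fst).take i = (l.take i).map Prod.fst := (List.map_take ..).symm
          have hns2 : (a :: l.map Prod.snd).drop (i + 1) =
              (l[i]'hi).2 :: (l.drop (i + 1)).map Prod.snd := by
            rw [List.drop_succ_cons]
            conv_lhs => rw [← List.getElem_cons_drop
              (show i < (List.map Prod.snd l).length from by simpa using hi)]
            simp [List.map_drop]
          have hos2 : (l.map Prod.fst).drop (i + 1) = (l.drop (i + 1)).map Prod.fst :=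
            (List.map_drop ..).symm
          rw [hns1, hos1, hns2, hos2]
          simp [pvApply]

-- parse correspondences with the split of the character list
theorem pvA_parse_split : ∀ (cs : List Char) (result : List Tok) (num : List Char),
    pvA_parse cs result num =
      result ++ pvToks (pvInt (num ++ (pvSplit cs).1))
        ((pvSplit cs).2.map (fun p => (p.1, pvInt p.2))) := by
  intro cs
  induction cs with
  | nil => intro result num; simp [pvA_parse, pvSplit, pvToks, pvFlat]
  | cons c rest ih =>
      intro result num
      by_cases hc : c ∈ pvOps
      · simp only [pvA_parse, if_pos hc, pvSplit]
        rw [ih]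
        simp [pvToks, pvFlat]
      · simp only [pvA_parse, if_neg hc, pvSplit]
        rw [ih]
        simp [pvToks, pvFlat]

theorem pvB_tok_split : ∀ (cs : List Char) (nums : List Int) (ops : List Char) (cur : List Char),
    pvB_tok cs nums ops cur =
      (nums ++ pvInt (cur ++ (pvSplit cs).1) :: (pvSplit cs).2.map (fun p => pvInt p.2),
       ops ++ (pvSplit cs).2.map Prod.fst) := by
  intro cs
  induction cs with
  | nil => intro nums ops cur; simp [pvB_tok, pvSplit]
  | cons c rest ih =>
      intro nums ops cur
      by_cases hc : c ∈ pvOps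
      · simp only [pvB_tok, if_pos hc, pvSplit]
        rw [ih]
        simp
      · simp only [pvB_tok, if_neg hc, pvSplit]
        rw [ih]
        simp

theorem pvSplit_fst_ops : ∀ (cs : List Char),
    (pvSplit cs).2.map Prod.fst = cs.filter (fun c => decide (c ∈ pvOps)) := by
  intro cs
  induction cs with
  | nil => simp [pvSplit]
  | cons c rest ih =>
      by_cases hc : c ∈ pvOps
      · simp [pvSplit, hc, ih]
      · simp [pvSplit, hc, ih]

-- unconditional equality of the two ports
-- both ports compute the same value for one priority permutation
theorem pvPoint (cs : List Char) (p : List Char)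
    (hp : p ∈ PySem.List.permutations
      (PySem.Set.ofList (cs.filter (fun c => decide (c ∈ pvOps))))
      (PySem.Set.ofList (cs.filter (fun c => decide (c ∈ pvOps)))).length) :
    pvA_calc (pvToks (pvInt (pvSplit cs).1) ((pvSplit cs).2.map (fun q => (q.1, pvInt q.2)))) p =
      |pvB_eval (pvInt (pvSplit cs).1 :: ((pvSplit cs).2.map (fun q => (q.1, pvInt q.2))).map Prod.snd)
         (((pvSplit cs).2.map (fun q => (q.1, pvInt q.2))).map Prod.fst) p| := by
  have hperm : p.Perm (PySem.Set.ofList (cs.filter (fun c => decide (c ∈ pvOps)))) :=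
    PySem.List.perm_of_mem_permutations hp
  have hnd : p.Nodup := hperm.nodup_iff.mpr (PySem.Set.nodup_ofList _)
  have hopsp : ∀ c ∈ p, c ∈ pvOps := by
    intro c hcp
    have h1 := (PySem.Set.mem_ofList _ _).mp (hperm.mem_iff.mp hcp)
    simpa using (List.mem_filter.mp h1).2
  have hsub : ∀ q ∈ (pvSplit cs).2.map (fun q => (q.1, pvInt q.2)), q.1 ∈ p := by
    intro q hq
    rcases List.mem_map.mp hq with ⟨r, hr, rfl⟩
    have h1 : r.1 ∈ (pvSplit cs).2.map Prod.fst := List.mem_map.mpr ⟨r, hr, rfl⟩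
    rw [pvSplit_fst_ops] at h1
    exact hperm.mem_iff.mpr ((PySem.Set.mem_ofList _ _).mpr h1)
  unfold pvA_calc
  rw [pvA_foldl_sweeps p hopsp]
  rw [pvMain (((pvSplit cs).2.map (fun q => (q.1, pvInt q.2))).length + p.length) p _ _
    le_rfl hnd hsub]
  simp [pvToks, pvTokNum]

theorem pvPorts_eq (expression : String) : solution expression = solution_alt expression := by
  unfold solution solution_alt
  have hparse := pvA_parse_split expression.toList [] []
  have htok := pvB_tok_split expression.toList [] [] []
  simp only [List.nil_append] at hparse htok
  rw [hparse, htok]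
  have hoper : expression.toList.foldl
      (fun s ch => if ch ∈ pvOps then PySem.Set.add s ch else s) PySem.Set.empty =
      PySem.Set.ofList (expression.toList.filter (fun c => decide (c ∈ pvOps))) := by
    rw [PySem.List.foldl_ite_eq_foldl_filter (p := fun ch => ch ∈ pvOps) (f := PySem.Set.add)]
    rw [PySem.Set.ofList_eq_foldl]
    rfl
  rw [hoper]
  dsimp only
  rw [PySem.List.dedup_eq_ofList, pvSplit_fst_ops]
  -- the two maps of B's tokenizer output, as maps of the pair list
  have hsnd : ((pvSplit expression.toList).2.map (fun q => (q.1, pvInt q.2))).map Prod.snd =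
      (pvSplit expression.toList).2.map (fun q => pvInt q.2) := by
    rw [List.map_map]; rfl
  have hfst : ((pvSplit expression.toList).2.map (fun q => (q.1, pvInt q.2))).map Prod.fst =
      (pvSplit expression.toList).2.map Prod.fst := by
    rw [List.map_map]; rfl
  cases hper : PySem.List.permutations
      (PySem.Set.ofList (expression.toList.filter (fun c => decide (c ∈ pvOps))))
      (PySem.Set.ofList (expression.toList.filter (fun c => decide (c ∈ pvOps)))).length with
  | nil =>
      have h0 : PySem.List.max? ([] : List Int) (fun v => v) = none :=
        (PySem.List.max?_eq_none_iff _ _).mpr rfl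
      simp [h0]
  | cons q t =>
      have hpoint : ∀ r ∈ q :: t,
          pvA_calc (pvToks (pvInt (pvSplit expression.toList).1)
            ((pvSplit expression.toList).2.map (fun q => (q.1, pvInt q.2)))) r =
          |pvB_eval (pvInt (pvSplit expression.toList).1 ::
              (pvSplit expression.toList).2.map (fun q => pvInt q.2))
            (expression.toList.filter (fun c => decide (c ∈ pvOps))) r| := by
        intro r hr
        have := pvPoint expression.toList r (by rw [hper]; exact hr)
        rw [hsnd, hfst, pvSplit_fst_ops] at this
        exact this
      rw [PySem.List.foldl_congr_mem (q :: t) _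
        (fun ans r => max ans (|pvB_eval (pvInt (pvSplit expression.toList).1 ::
            (pvSplit expression.toList).2.map (fun q => pvInt q.2))
          (expression.toList.filter (fun c => decide (c ∈ pvOps))) r|)) 0
        (fun acc x hx => by rw [hpoint x hx])]
      rw [← List.foldl_map, List.map_cons, PySem.List.max?_id_cons, Option.getD_some,
        List.foldl_cons, max_eq_right (abs_nonneg _)]


-- ===== VERDICT (by name: the statement is the Claim_ definition above) =====
theorem solution_spec : Claim_equal_solution := by
  intro e _ _
  unfold Spec_solution
  exact pvPorts_eq e
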